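-- pv_equiv track=rewrite | github.com/CrakeNotSnowman/secret_santa | secretSanta.py | couple_gift
-- ===== SOURCE A (Python) =====
-- def shiftit(names, i):
--     '''
--     Following the method laid out by Dr Hannah Fry in
--     a Numberphile video:
--     https://www.youtube.com/watch?v=5kC5k5QBqcc
--     and with some modifications:
--     after a shuffle, each person gets a gift for the person
--     to their right in the list
--     '''
--     i += 1
--     if i == len(names):
--         i = 0
--     return names[i]
--
-- def couple_gift(names, couples):
--     '''
--     Looks to see if a member of a couple
--     is buy a gift for their partner
--     '''
--     #couples = [['a', 'b'], ['c', 'd']]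
--     for i in range(len(names)):
--         a = names[i]
--         b = shiftit(names, i)
--         for couple in couples:
--             if (a in couple) and (b in couple):
--                 return False
--     return True
-- ===== SOURCE B (Python) =====
-- def couple_gift(names, couples):
--     '''
--     Looks to see if a member of a couple
--     is buy a gift for their partner
--     '''
--     n = len(names)
--     for couple in couples:
--         positions = {i for i, name in enumerate(names) if name in couple}
--         if any((p + 1) % n in positions for p in positions):
--             return False
--     return True
-- ===== Notes on version B (the rewrite author's own statement) =====
-- stated objective: alternative
-- what changed: B loops over couples and builds the set of seat indices each couple occupies, then checks whether any occupied seat's cyclic successor (p+1) % n is also occupied, instead of A's scan over all cyclically adjacent seat pairs with an inner loop over couples.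
import Mathlib
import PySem

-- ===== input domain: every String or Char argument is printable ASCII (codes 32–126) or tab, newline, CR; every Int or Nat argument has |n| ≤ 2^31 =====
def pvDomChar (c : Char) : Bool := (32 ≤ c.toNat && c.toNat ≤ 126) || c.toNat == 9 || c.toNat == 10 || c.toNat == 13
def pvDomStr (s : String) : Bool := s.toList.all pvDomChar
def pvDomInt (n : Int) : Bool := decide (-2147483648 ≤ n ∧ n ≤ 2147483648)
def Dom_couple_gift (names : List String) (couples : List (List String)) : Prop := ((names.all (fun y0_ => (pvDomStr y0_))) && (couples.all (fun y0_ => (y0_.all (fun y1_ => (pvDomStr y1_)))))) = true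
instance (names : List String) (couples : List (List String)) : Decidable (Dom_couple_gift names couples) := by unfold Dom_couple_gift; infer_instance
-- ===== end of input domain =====

-- B checks, per couple, whether the set of occupied seat indices contains two cyclically
-- adjacent seats, instead of A's scan over adjacent seat pairs with an inner couple loop
-- (objective: alternative decomposition, same asymptotic cost).

-- ===== PORT A =====
def shiftit (names : List String) (i : Int) : String :=
  let i2 := i + 1
  let i3 := if i2 = (names.length : Int) then 0 else i2
  PySem.List.pyGetD names i3 ""

def coupleGiftLoopA (names : List String) (couples : List (List String)) : List Int → Bool
  | [] => true
  | i :: rest =>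
    let a := PySem.List.pyGetD names i ""
    let b := shiftit names i
    if couples.any (fun couple => couple.contains a && couple.contains b) then false
    else coupleGiftLoopA names couples rest

def couple_gift (names : List String) (couples : List (List String)) : Bool :=
  coupleGiftLoopA names couples (PySem.List.pyRange 0 (names.length : Int) 1)

-- ===== PORT B =====
def couple_gift_alt (names : List String) (couples : List (List String)) : Bool :=
  let n : Int := names.length
  couples.all (fun couple =>
    let positions : List Int :=
      ((PySem.List.enumerate names 0).filter (fun p => couple.contains p.2)).map (·.1)
    !(positions.any (fun p => positions.contains (PySem.Int.mod (p + 1) n))))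

-- ===== PRECONDITION & SPEC =====
def Spec_couple_gift (names : List String) (couples : List (List String)) (out : Bool) : Prop := out = couple_gift_alt names couples
instance (names : List String) (couples : List (List String)) (out : Bool) : Decidable (Spec_couple_gift names couples out) := by unfold Spec_couple_gift; infer_instance

-- ===== CLAIM (what is proved, stated in full; the proofs are below) =====
def Claim_equal_couple_gift : Prop := ∀ (names : List String) (couples : List (List String)), Dom_couple_gift names couples → Spec_couple_gift names couples (couple_gift names couples)

-- ===== LEMMAS AND PROOFS =====

-- Common characterisation: seat i and the cyclically next seat are both occupied by couple c.
def NoHit (names : List String) (couples : List (List String)) : Prop :=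
  ∀ c ∈ couples, ∀ i < names.length,
    ¬ (names.getD i "" ∈ c ∧ names.getD ((i + 1) % names.length) "" ∈ c)

theorem loopA_eq_all (names : List String) (couples : List (List String)) (is : List Int) :
    coupleGiftLoopA names couples is
      = is.all (fun i => !(couples.any (fun c =>
          c.contains (PySem.List.pyGetD names i "") && c.contains (shiftit names i)))) := by
  induction is with
  | nil => rfl
  | cons i rest ih =>
    simp only [coupleGiftLoopA, List.all_cons, ← ih]
    cases h : (couples.any (fun c =>
        c.contains (PySem.List.pyGetD names i "") && c.contains (shiftit names i))) <;>
      simp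

theorem shiftit_natCast (names : List String) (k : Nat) (hk : k < names.length) :
    shiftit names (k : Int) = names.getD ((k + 1) % names.length) "" := by
  have hdef : shiftit names (k : Int)
      = PySem.List.pyGetD names (if (k : Int) + 1 = (names.length : Int) then 0 else (k : Int) + 1) "" := rfl
  rw [hdef]
  by_cases h : k + 1 = names.length
  · have h1 : ((k : Int) + 1) = (names.length : Int) := by omega
    rw [if_pos h1]
    have h2 : (k + 1) % names.length = 0 := by rw [h]; exact Nat.mod_self _
    rw [h2]
    have h3 : ((0 : Int)) = ((0 : Nat) : Int) := rfl
    rw [h3, PySem.List.pyGetD_natCast]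
  · have h1 : ((k : Int) + 1) ≠ (names.length : Int) := by omega
    rw [if_neg h1]
    have h2 : (k + 1) % names.length = k + 1 := Nat.mod_eq_of_lt (by omega)
    rw [h2]
    have h3 : ((k : Int) + 1) = (((k + 1 : Nat)) : Int) := by push_cast; ring
    rw [h3, PySem.List.pyGetD_natCast]

theorem A_iff (names : List String) (couples : List (List String)) :
    couple_gift names couples = true ↔ NoHit names couples := by
  unfold couple_gift NoHit
  rw [loopA_eq_all]
  simp only [List.all_eq_true, PySem.List.mem_pyRange_one, and_imp, Bool.not_eq_true',
    List.any_eq_false, List.contains_eq_mem, Bool.and_eq_true, decide_eq_true_eq]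
  constructor
  · intro h c hc k hk hit
    have h2 := h (k : Int) (by positivity) (by exact_mod_cast hk) c hc
    rw [PySem.List.pyGetD_natCast, shiftit_natCast names k hk] at h2
    tauto
  · intro h i hi0 hi1 c hc
    obtain ⟨k, rfl⟩ := Int.eq_ofNat_of_zero_le hi0
    have hk : k < names.length := by exact_mod_cast hi1
    rw [PySem.List.pyGetD_natCast, shiftit_natCast names k hk]
    have h2 := h c hc k hk
    tauto

theorem mem_positions (names : List String) (c : List String) (p : Int) :
    (p ∈ ((PySem.List.enumerate names 0).filter (fun q => decide (q.2 ∈ c))).map (·.1))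
      ↔ ∃ k : Nat, k < names.length ∧ p = (k : Int) ∧ names.getD k "" ∈ c := by
  simp only [List.mem_map, List.mem_filter, PySem.List.mem_enumerate_iff, decide_eq_true_eq]
  constructor
  · rintro ⟨q, ⟨⟨k, hk, rfl⟩, hmem⟩, rfl⟩
    refine ⟨k, hk, by simp, ?_⟩
    rwa [List.getD_eq_getElem _ _ hk]
  · rintro ⟨k, hk, rfl, hmem⟩
    refine ⟨((0 : Int) + k, names[k]), ⟨⟨k, hk, rfl⟩, ?_⟩, by simp⟩
    rwa [List.getD_eq_getElem _ _ hk] at hmem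

theorem mod_succ_natCast (k n : Nat) (hn : 0 < n) :
    PySem.Int.mod ((k : Int) + 1) (n : Int) = (((k + 1) % n : Nat) : Int) := by
  rw [PySem.Int.mod_eq_emod_of_pos (by exact_mod_cast hn)]
  push_cast
  omega

theorem B_iff (names : List String) (couples : List (List String)) :
    couple_gift_alt names couples = true ↔ NoHit names couples := by
  unfold couple_gift_alt NoHit
  simp only [List.all_eq_true, Bool.not_eq_true', List.any_eq_false,
    List.contains_eq_mem, decide_eq_true_eq]
  constructor
  · intro h c hc k hk hit
    have hmem1 := (mem_positions names c ((k : Int))).mpr ⟨k, hk, rfl, hit.1⟩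
    have h2 := h c hc _ hmem1
    apply h2
    rw [mod_succ_natCast k names.length (by omega)]
    exact (mem_positions names c _).mpr
      ⟨(k + 1) % names.length, Nat.mod_lt _ (by omega), rfl, hit.2⟩
  · intro h c hc p hp
    rw [mem_positions] at hp
    obtain ⟨k, hk, rfl, hmem⟩ := hp
    rw [mod_succ_natCast k names.length (by omega), mem_positions]
    rintro ⟨k2, hk2, hcast, hmem2⟩
    have he : (k + 1) % names.length = k2 := by exact_mod_cast hcast
    subst he
    exact h c hc k hk ⟨hmem, hmem2⟩

-- ===== VERDICT (by name: the statement is the Claim_ definition above) =====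
theorem couple_gift_spec : Claim_equal_couple_gift := by
  intro names couples _
  unfold Spec_couple_gift
  rw [Bool.eq_iff_iff, A_iff, B_iff]
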